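-- pv_equiv track=rewrite | github.com/Rushijaviya/LeetCode-Contest | Weekly Contest/Weekly Contest 290/4_Number of Flowers in Full Bloom.py | fullBloomFlowers
-- ===== SOURCE A (Python) =====
-- def fullBloomFlowers(flowers, persons):
--
--     def started(l,target):
--         left,right=0,len(l)-1
--         while left<=right:
--             mid=(left+right)//2
--             if l[mid]>target:
--                 right=mid-1
--             else:
--                 left=mid+1
--         return left
--
--     def ended(l,target):
--         left,right=0,len(l)-1
--         while left<=right:
--             mid=(left+right)//2
--             if l[mid]>=target:
--                 right=mid-1
--             else:
--                 left=mid+1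
--         return left
--
--     start=[]
--     end=[]
--     for i,j in flowers:
--         start.append(i)
--         end.append(j)
--     start.sort()
--     end.sort()
--     ans=[]
--     for per in persons:
--         ans.append(started(start,per)-ended(end,per))
--     return ans
-- ===== SOURCE B (Python) =====
-- def fullBloomFlowers(flowers, persons):
--     # For each person: (#flowers already started) - (#flowers already ended),
--     # counted directly in one pass over flowers (no sorting, no binary search).
--     return [sum(1 for s, _ in flowers if s <= p) - sum(1 for _, e in flowers if e < p)
--             for p in persons]
-- ===== Notes on version B (the rewrite author's own statement) =====
-- stated objective: simpler
-- what changed: Replaces sorting both endpoint lists plus two hand-written binary searches per person with a direct per-person count of starts <= p minus ends < p over the unsorted flowers list.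
import Mathlib
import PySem

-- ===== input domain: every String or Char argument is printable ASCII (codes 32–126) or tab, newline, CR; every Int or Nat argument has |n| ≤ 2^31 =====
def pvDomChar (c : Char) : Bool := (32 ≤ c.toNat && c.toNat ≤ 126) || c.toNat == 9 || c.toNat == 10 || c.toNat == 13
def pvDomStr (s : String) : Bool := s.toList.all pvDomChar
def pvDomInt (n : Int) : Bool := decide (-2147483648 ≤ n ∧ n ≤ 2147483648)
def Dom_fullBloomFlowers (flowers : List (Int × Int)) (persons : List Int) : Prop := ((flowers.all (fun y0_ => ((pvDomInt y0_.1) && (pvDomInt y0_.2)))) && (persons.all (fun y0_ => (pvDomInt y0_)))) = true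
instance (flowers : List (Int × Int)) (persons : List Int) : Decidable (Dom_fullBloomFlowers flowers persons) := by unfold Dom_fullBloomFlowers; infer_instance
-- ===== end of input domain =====

-- B replaces sorting plus hand-written binary searches with a direct per-person
-- count of starts ≤ p minus ends < p; simpler, same return value on all inputs.


-- ===== PORT A =====
-- A's two inner binary-search loops `started`/`ended` are the same while-loop up to
-- the branch test (`l[mid] > target` resp. `l[mid] >= target`); `pvSearch p` is that
-- loop with `p v` = the negation of the branch test.  The `none` arm mirrors
-- Python's IndexError; it is unreachable for the in-range calls A makes.
def pvSearch (p : Int → Bool) (l : List Int) (left right : Int) : Int :=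
  if _h : left ≤ right then
    match _hg : PySem.List.pyGet? l (PySem.Int.floordiv (left + right) 2) with
    | some v =>
        if p v then pvSearch p l (PySem.Int.floordiv (left + right) 2 + 1) right
        else pvSearch p l left (PySem.Int.floordiv (left + right) 2 - 1)
    | none => 0
  else left
termination_by (right + 1 - left).toNat
decreasing_by
  · have := PySem.Int.floordiv_two_mid_bounds _h; omega
  · have := PySem.Int.floordiv_two_mid_bounds _h; omega

-- started(l, target) = pvSearch (· ≤ target) l 0 (len l - 1)
-- ended(l, target)   = pvSearch (· < target) l 0 (len l - 1)
def fullBloomFlowers (flowers : List (Int × Int)) (persons : List Int) : List Int :=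
  let se := flowers.foldl (fun (acc : List Int × List Int) ij => (acc.1 ++ [ij.1], acc.2 ++ [ij.2])) ([], [])
  let start := PySem.List.sorted se.1 (fun x => x) false
  let end_ := PySem.List.sorted se.2 (fun x => x) false
  persons.foldl (fun ans per =>
    ans ++ [pvSearch (fun x => decide (x ≤ per)) start 0 ((start.length : Int) - 1)
            - pvSearch (fun x => decide (x < per)) end_ 0 ((end_.length : Int) - 1)]) []

-- ===== PORT B =====
def fullBloomFlowers_alt (flowers : List (Int × Int)) (persons : List Int) : List Int :=
  persons.map (fun p =>
    (flowers.countP (fun f => decide (f.1 ≤ p)) : Int) - (flowers.countP (fun f => decide (f.2 < p)) : Int))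

-- ===== PRECONDITION & SPEC =====
def Spec_fullBloomFlowers (flowers : List (Int × Int)) (persons : List Int) (out : List Int) : Prop := out = fullBloomFlowers_alt flowers persons
instance (flowers : List (Int × Int)) (persons : List Int) (out : List Int) : Decidable (Spec_fullBloomFlowers flowers persons out) := by unfold Spec_fullBloomFlowers; infer_instance

-- ===== CLAIM (what is proved, stated in full; the proofs are below) =====
def Claim_equal_fullBloomFlowers : Prop := ∀ (flowers : List (Int × Int)) (persons : List Int), Dom_fullBloomFlowers flowers persons → Spec_fullBloomFlowers flowers persons (fullBloomFlowers flowers persons)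

-- ===== LEMMAS AND PROOFS =====

-- In a sorted list, if the (downward-closed) predicate fails at index i, all
-- satisfying elements lie strictly before i.
lemma countP_le_of_false {p : Int → Bool}
    (hmono : ∀ x y : Int, x ≤ y → p y = true → p x = true)
    {l : List Int} (hs : l.Pairwise (· ≤ ·))
    {i : Nat} (hi : i < l.length) (hp : p l[i] = false) :
    l.countP p ≤ i := by
  have hsplit : l = l.take i ++ l.drop i := (List.take_append_drop i l).symm
  have hdrop : (l.drop i).countP p = 0 := by
    rw [List.countP_eq_zero]
    intro a ha
    rcases List.mem_iff_getElem.mp ha with ⟨k, hk, rfl⟩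
    have hk' : k < l.length - i := by simpa using hk
    have hik : i + k < l.length := by omega
    have hEq : (List.drop i l)[k]'hk = l[i + k]'hik := by
      simp [List.getElem_drop]
    rw [hEq]
    by_contra hpa
    have hpa' : p l[i + k] = true := hpa
    rcases Nat.eq_zero_or_pos k with hk0 | hk0
    · subst hk0; simp at hpa'; rw [hp] at hpa'; exact Bool.false_ne_true hpa'
    · have hle : l[i] ≤ l[i + k] := by
        have := List.pairwise_iff_getElem.mp hs i (i + k) hi hik (by omega)
        exact this
      have := hmono _ _ hle hpa'
      rw [hp] at this; exact Bool.false_ne_true this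
  have h1 : l.countP p = (l.take i).countP p + (l.drop i).countP p := by
    conv_lhs => rw [hsplit]
    exact List.countP_append ..
  have h2 : (l.take i).countP p ≤ (l.take i).length := List.countP_le_length
  have h3 : (l.take i).length ≤ i := by simp
  omega

-- In a sorted list, if the (downward-closed) predicate holds at index i, all of
-- the first i+1 elements satisfy it.
lemma lt_countP_of_true {p : Int → Bool}
    (hmono : ∀ x y : Int, x ≤ y → p y = true → p x = true)
    {l : List Int} (hs : l.Pairwise (· ≤ ·))
    {i : Nat} (hi : i < l.length) (hp : p l[i] = true) :
    i < l.countP p := by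
  have hsplit : l = l.take (i + 1) ++ l.drop (i + 1) := (List.take_append_drop (i + 1) l).symm
  have htake : (l.take (i + 1)).countP p = (l.take (i + 1)).length := by
    rw [List.countP_eq_length]
    intro a ha
    rcases List.mem_iff_getElem.mp ha with ⟨k, hk, rfl⟩
    have hk' : k < i + 1 := by have := hk; simp at this; omega
    have hkl : k < l.length := by omega
    have hEq : (List.take (i + 1) l)[k]'hk = l[k]'hkl := by
      simp [List.getElem_take]
    rw [hEq]
    rcases Nat.lt_or_ge k i with hki | hki
    · have hle : l[k] ≤ l[i] :=
        List.pairwise_iff_getElem.mp hs k i hkl hi hki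
      exact hmono _ _ hle hp
    · have : k = i := by omega
      subst this; exact hp
  have hlen : (l.take (i + 1)).length = i + 1 := by simp; omega
  have h1 : l.countP p = (l.take (i + 1)).countP p + (l.drop (i + 1)).countP p := by
    conv_lhs => rw [hsplit]
    exact List.countP_append ..
  omega

-- The binary-search loop on a sorted list computes countP of a downward-closed
-- predicate, given the loop invariant left ≤ countP ≤ right + 1.
lemma pvSearch_eq_countP {p : Int → Bool}
    (hmono : ∀ x y : Int, x ≤ y → p y = true → p x = true)
    {l : List Int} (hs : l.Pairwise (· ≤ ·)) :
    ∀ (n : Nat) (left right : Int), (right + 1 - left).toNat ≤ n →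
      0 ≤ left → right < (l.length : Int) →
      left ≤ (l.countP p : Int) → (l.countP p : Int) ≤ right + 1 →
      pvSearch p l left right = (l.countP p : Int) := by
  intro n
  induction n with
  | zero =>
    intro left right hn h0 _ hlc hcr
    rw [pvSearch]
    have : ¬ (left ≤ right) := by omega
    simp only [this, dite_false]
    omega
  | succ n ih =>
    intro left right hn h0 hr hlc hcr
    rw [pvSearch]
    by_cases hlr : left ≤ right
    · simp only [hlr, dite_true]
      have hmid := PySem.Int.floordiv_two_mid_bounds hlr
      set mid := PySem.Int.floordiv (left + right) 2 with hmiddef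
      have h0m : 0 ≤ mid := by omega
      have hml : mid < (l.length : Int) := by omega
      have hget : PySem.List.pyGet? l mid = some l[mid.toNat] :=
        PySem.List.pyGet?_eq_some_getElem l h0m hml
      rw [hget]
      have hmn : mid.toNat < l.length := by omega
      by_cases hpv : p l[mid.toNat] = true
      · simp only [hpv, if_true]
        have hlt : mid.toNat < l.countP p := lt_countP_of_true hmono hs hmn hpv
        exact ih (mid + 1) right (by omega) (by omega) hr (by omega) hcr
      · have hpv' : p l[mid.toNat] = false := by
          cases h : p l[mid.toNat] with
          | true => exact absurd h hpv
          | false => rfl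
        simp only [hpv', Bool.false_eq_true, if_false]
        have hle : l.countP p ≤ mid.toNat := countP_le_of_false hmono hs hmn hpv'
        exact ih left (mid - 1) (by omega) h0 (by omega) hlc (by omega)
    · simp only [hlr, dite_false]
      omega

-- started / ended over the sorted list compute countP over the original list.
lemma search_sorted_eq_countP {p : Int → Bool}
    (hmono : ∀ x y : Int, x ≤ y → p y = true → p x = true) (xs : List Int) :
    pvSearch p (PySem.List.sorted xs (fun x => x) false) 0
      (((PySem.List.sorted xs (fun x => x) false).length : Int) - 1) = (xs.countP p : Int) := by
  set l := PySem.List.sorted xs (fun x => x) false with hl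
  have hperm : l.Perm xs := PySem.List.sorted_perm xs (fun x => x) false
  have hcount : l.countP p = xs.countP p := hperm.countP_eq p
  have hs : l.Pairwise (· ≤ ·) := PySem.List.sorted_pairwise xs (fun x => x)
  have hclen : l.countP p ≤ l.length := List.countP_le_length
  rw [← hcount]
  exact pvSearch_eq_countP hmono hs ((l.length : Int) + 1 - 0).toNat 0 ((l.length : Int) - 1)
    (by omega) (by omega) (by omega) (by positivity) (by omega)

-- ===== VERDICT (by name: the statement is the Claim_ definition above) =====
theorem fullBloomFlowers_spec : Claim_equal_fullBloomFlowers := by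
  intro flowers persons _
  unfold Spec_fullBloomFlowers
  simp only [fullBloomFlowers, fullBloomFlowers_alt]
  rw [show (fun (acc : List Int × List Int) (ij : Int × Int) => (acc.1 ++ [ij.1], acc.2 ++ [ij.2]))
        = (fun (s : List Int × List Int) (e : Int × Int) => (s.1 ++ [Prod.fst e], s.2 ++ [Prod.snd e])) from rfl,
      PySem.List.foldl_prod_mk (fun (s : List Int) (e : Int × Int) => s ++ [e.1])
        (fun (s : List Int) (e : Int × Int) => s ++ [e.2])]
  simp only [PySem.List.foldl_append_singleton_eq_map, List.nil_append]
  apply List.map_congr_left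
  intro per _
  rw [search_sorted_eq_countP (p := fun x => decide (x ≤ per))
        (fun x y hxy hy => by simp at hy ⊢; omega),
      search_sorted_eq_countP (p := fun x => decide (x < per))
        (fun x y hxy hy => by simp at hy ⊢; omega)]
  rw [List.countP_map, List.countP_map]
  rfl
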